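-- pv_equiv track=rewrite | github.com/MicSie/adventofcode_2023 | day05/failed_brute_force.py | read_mapping
-- ===== SOURCE A (Python) =====
-- def read_mapping(lines: list[str]) -> tuple[frozenset[tuple[int, int, int]], int]:
--     result = set()
--     read = 0
--     start_found = False
--     for line in lines:
--         read += 1
--         if "map:" in line:
--             start_found = True
--             continue
--         if len(line) == 0:
--             if start_found:
--                 break
--             continue
--         numbers = line.split()
--         destination = int(numbers[0])
--         source = int(numbers[1])
--         count = int(numbers[2])
--         result.add((source, destination, count))
--     return (frozenset(result), read)
-- ===== SOURCE B (Python) =====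
-- def read_mapping(lines: list[str]) -> tuple[frozenset[tuple[int, int, int]], int]:
--     # pass 1: find the stop boundary (index just past the blank line that ends the block)
--     stop = len(lines)
--     seen_map = False
--     for i, line in enumerate(lines):
--         if "map:" in line:
--             seen_map = True
--         elif seen_map and len(line) == 0:
--             stop = i + 1
--             break
--     # pass 2: parse every data line up to the boundary
--     result = frozenset(
--         (int(n[1]), int(n[0]), int(n[2]))
--         for line in lines[:stop]
--         if "map:" not in line and len(line) != 0
--         for n in [line.split()]
--     )
--     return (result, stop)
-- ===== Notes on version B (the rewrite author's own statement) =====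
-- stated objective: alternative
-- what changed: Replaces the single interleaved loop-with-break by two passes: a boundary scan that computes the returned line count, then a comprehension over the prefix that filters and parses the data lines.
import Mathlib
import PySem

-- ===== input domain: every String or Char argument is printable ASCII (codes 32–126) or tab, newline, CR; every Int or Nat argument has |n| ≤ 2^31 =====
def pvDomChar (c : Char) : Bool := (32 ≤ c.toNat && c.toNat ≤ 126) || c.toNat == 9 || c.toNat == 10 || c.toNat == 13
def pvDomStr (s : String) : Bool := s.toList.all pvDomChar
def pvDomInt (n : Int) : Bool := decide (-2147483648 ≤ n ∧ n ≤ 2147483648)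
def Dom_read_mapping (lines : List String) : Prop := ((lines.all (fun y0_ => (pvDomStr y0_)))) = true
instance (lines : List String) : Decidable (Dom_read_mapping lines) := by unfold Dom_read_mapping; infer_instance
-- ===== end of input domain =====

-- B replaces A's single interleaved loop-with-break by a boundary scan plus a separate filter/parse pass (alternative decomposition, same cost).

-- ===== PORT A =====
-- transliteration of A's loop: result/read/start_found threaded through a structural recursion; the wildcard
-- match arm is the ValueError/IndexError of int(numbers[i]) / numbers[i], excluded by Pre_read_mapping
def goA (acc : List (Int × Int × Int)) (read : Int) (startFound : Bool) : List String → (List (Int × Int × Int)) × Int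
  | [] => (acc, read)
  | line :: rest =>
    let read' := read + 1
    if PySem.Str.isIn "map:" line then goA acc read' true rest
    else if PySem.Str.len line == 0 then
      if startFound then (acc, read') else goA acc read' startFound rest
    else
      let numbers := PySem.Str.split₀ line
      match (PySem.List.pyGet? numbers 0).bind PySem.Int.ofStr?,
            (PySem.List.pyGet? numbers 1).bind PySem.Int.ofStr?,
            (PySem.List.pyGet? numbers 2).bind PySem.Int.ofStr? with
      | some destination, some source, some count =>
          goA (PySem.Set.add acc (source, destination, count)) read' startFound rest
      | _, _, _ => (acc, read')

def read_mapping (lines : List String) : (List (Int × Int × Int)) × Int :=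
  goA PySem.Set.empty 0 false lines

-- ===== PORT B =====
-- pass 1 of Source B: the stop boundary (some k = break after k lines; none = no break)
def pvStop (seen : Bool) : List String → Option Nat
  | [] => none
  | l :: rest =>
    if PySem.Str.isIn "map:" l then (pvStop true rest).map (· + 1)
    else if seen && (PySem.Str.len l == 0) then some 1
    else (pvStop seen rest).map (· + 1)

-- one line of Source B's comprehension: n = line.split(); (int(n[1]), int(n[0]), int(n[2])); none = ValueError/IndexError
def pvParseLine (line : String) : Option (Int × Int × Int) :=
  let n := PySem.Str.split₀ line
  match (PySem.List.pyGet? n 1).bind PySem.Int.ofStr?,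
        (PySem.List.pyGet? n 0).bind PySem.Int.ofStr?,
        (PySem.List.pyGet? n 2).bind PySem.Int.ofStr? with
  | some s, some d, some c => some (s, d, c)
  | _, _, _ => none

def read_mapping_alt (lines : List String) : (List (Int × Int × Int)) × Int :=
  let stop := (pvStop false lines).getD lines.length
  let result := PySem.Set.ofList
    (((lines.take stop).filter
        (fun l => !(PySem.Str.isIn "map:" l) && !(PySem.Str.len l == 0))).filterMap pvParseLine)
  (result, (stop : Int))

-- ===== PRECONDITION & SPEC =====
-- closed-form helpers for Pre_: a line is a data line iff it has no "map:" and is non-empty;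
-- the loop has broken before index i iff some earlier line is empty with the flag already set
def pvIsMap (s : String) : Bool := PySem.Str.isIn "map:" s
def pvIsEmpty (s : String) : Bool := PySem.Str.len s == 0
def pvKeep (s : String) : Bool := !(pvIsMap s) && !(pvIsEmpty s)
def pvParses3 (line : String) : Bool :=
  let n := PySem.Str.split₀ line
  ((PySem.List.pyGet? n 0).bind PySem.Int.ofStr?).isSome &&
  ((PySem.List.pyGet? n 1).bind PySem.Int.ofStr?).isSome &&
  ((PySem.List.pyGet? n 2).bind PySem.Int.ofStr?).isSome
def pvBrokeBefore (seen : Bool) (lines : List String) (i : Nat) : Bool :=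
  (List.range i).any (fun k =>
    pvIsEmpty (lines.getD k "") &&
    (seen || (List.range k).any (fun j => pvIsMap (lines.getD j ""))))
def PreG (seen : Bool) (lines : List String) : Prop :=
  ∀ i < lines.length, pvBrokeBefore seen lines i = false →
    pvKeep (lines.getD i "") = true → pvParses3 (lines.getD i "") = true

-- Pre_ = exactly the inputs where A returns: every data line the loop actually reaches
-- splits into at least three int-parsable tokens (otherwise int()/indexing raises)
def Pre_read_mapping (lines : List String) : Prop := PreG false lines
instance (lines : List String) : Decidable (Pre_read_mapping lines) := by
  unfold Pre_read_mapping PreG; infer_instance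

def pvWitness_read_mapping : List String :=
  ["seed-to-soil map:", "50 98 2", "52 50 48", "", "junk after break"]

def Spec_read_mapping (lines : List String) (out : (List (Int × Int × Int)) × Int) : Prop := out = read_mapping_alt lines
instance (lines : List String) (out : (List (Int × Int × Int)) × Int) : Decidable (Spec_read_mapping lines out) := by unfold Spec_read_mapping; infer_instance

-- ===== CLAIM (what is proved, stated in full; the proofs are below) =====
def Claim_equal_read_mapping : Prop := ∀ (lines : List String), Dom_read_mapping lines → Pre_read_mapping lines → Spec_read_mapping lines (read_mapping lines)

-- ===== LEMMAS AND PROOFS =====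

lemma map_succ_getD (o : Option Nat) (n : Nat) :
    (o.map (· + 1)).getD (n + 1) = o.getD n + 1 := by cases o <;> rfl

lemma inner_any (l : String) (rest : List String) : ∀ (k : Nat),
    (List.range (k + 1)).any (fun j => pvIsMap ((l :: rest).getD j ""))
      = (pvIsMap l || (List.range k).any (fun j => pvIsMap (rest.getD j ""))) := by
  intro k
  induction k with
  | zero => simp
  | succ k ih =>
    rw [List.range_succ, List.any_append, ih]
    conv_rhs => rw [List.range_succ, List.any_append]
    simp [Bool.or_assoc]

lemma pvBrokeBefore_cons (seen : Bool) (l : String) (rest : List String) (i : Nat) :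
    pvBrokeBefore seen (l :: rest) (i + 1)
      = ((pvIsEmpty l && seen) || pvBrokeBefore (seen || pvIsMap l) rest i) := by
  induction i with
  | zero => unfold pvBrokeBefore; simp
  | succ i ih =>
    unfold pvBrokeBefore at ih ⊢
    rw [List.range_succ, List.any_append, ih]
    conv_rhs => rw [List.range_succ, List.any_append]
    simp only [List.any_cons, List.any_nil, Bool.or_false, List.getD_cons_succ, inner_any]
    cases pvIsEmpty l <;> cases seen <;> cases pvIsMap l <;>
      cases pvIsEmpty (rest.getD i "") <;>
        simp [Bool.or_comm]

lemma preG_head (seen : Bool) (l : String) (rest : List String)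
    (h : PreG seen (l :: rest)) (hk : pvKeep l = true) : pvParses3 l = true := by
  have := h 0 (by simp) (by unfold pvBrokeBefore; simp)
  simpa using this hk

lemma preG_tail (seen : Bool) (l : String) (rest : List String)
    (h : PreG seen (l :: rest)) (hnb : (pvIsEmpty l && seen) = false) :
    PreG (seen || pvIsMap l) rest := by
  intro i hi hb hkeep
  have := h (i + 1) (by simpa using Nat.succ_lt_succ hi)
  rw [pvBrokeBefore_cons, hnb, Bool.false_or] at this
  simpa using this hb hkeep

lemma isIn_map_of_len_zero (l : String) (h : PySem.Str.len l = 0) :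
    PySem.Str.isIn "map:" l = false := by
  have h2 : l.toList = [] := List.length_eq_zero_iff.mp (by simpa [PySem.Str.len] using h)
  apply Bool.eq_false_iff.mpr
  intro hc
  rw [PySem.Str.isIn_iff_infix, h2] at hc
  simp at hc

lemma update_cons (acc : List (Int × Int × Int)) (t : Int × Int × Int) (L : List (Int × Int × Int)) :
    PySem.Set.update acc (t :: L) = PySem.Set.update (PySem.Set.add acc t) L := rfl

lemma goA_eq (rest : List String) : ∀ (acc : List (Int × Int × Int)) (read : Int) (seen : Bool),
    PreG seen rest →
    goA acc read seen rest =
      (PySem.Set.update acc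
        (((rest.take ((pvStop seen rest).getD rest.length)).filter pvKeep).filterMap pvParseLine),
       read + ((pvStop seen rest).getD rest.length)) := by
  induction rest with
  | nil =>
    intro acc read seen _
    simp [goA, pvStop, PySem.Set.update]
  | cons l rest ih =>
    intro acc read seen hpre
    by_cases hmap : PySem.Str.isIn "map:" l = true
    · -- "map:" line: flag set, line filtered out of B's comprehension
      have hm' : pvIsMap l = true := hmap
      have hEmp : pvIsEmpty l = false := by
        apply Bool.eq_false_iff.mpr
        intro hc
        have hl0 : PySem.Str.len l = 0 := by simpa [pvIsEmpty] using hc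
        rw [isIn_map_of_len_zero l hl0] at hmap
        exact absurd hmap (by simp)
      have htail := preG_tail seen l rest hpre (by rw [hEmp]; simp)
      rw [hm', Bool.or_true] at htail
      have hrec := ih acc (read + 1) true htail
      have hk : pvKeep l = false := by unfold pvKeep; rw [hm']; simp
      simp only [goA, pvStop, hmap, if_true, List.length_cons, map_succ_getD,
        List.take_succ_cons, List.filter_cons, hk, Bool.false_eq_true, if_false, hrec]
      rw [Prod.mk.injEq]
      exact ⟨rfl, by push_cast; ring⟩
    · have hmapb : pvIsMap l = false := by
        apply Bool.eq_false_iff.mpr; intro hc; exact hmap hc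
      by_cases hemp : (PySem.Str.len l == 0) = true
      · have hEmpT : pvIsEmpty l = true := hemp
        cases hseen : seen
        · -- empty line, flag not set: skipped
          have htail := preG_tail seen l rest hpre (by rw [hseen]; simp)
          rw [hmapb, Bool.or_false, hseen] at htail
          have hrec := ih acc (read + 1) false htail
          have hk : pvKeep l = false := by unfold pvKeep; rw [hEmpT]; simp
          simp only [goA, pvStop, hmap, hemp, if_true, Bool.false_eq_true, if_false,
            Bool.false_and, List.length_cons, map_succ_getD, List.take_succ_cons,
            List.filter_cons, hk, hrec]
          rw [Prod.mk.injEq]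
          exact ⟨rfl, by push_cast; ring⟩
        · -- empty line, flag set: break
          have hk : pvKeep l = false := by unfold pvKeep; rw [hEmpT]; simp
          simp only [goA, pvStop, hmap, hemp, if_true, Bool.false_eq_true, if_false,
            Bool.true_and, Option.getD_some, List.take_succ_cons, List.take_zero,
            List.filter_cons, hk]
          simp [PySem.Set.update]
      · -- data line
        have hEmpF : pvIsEmpty l = false := by
          apply Bool.eq_false_iff.mpr; intro hc; exact hemp hc
        have hk : pvKeep l = true := by unfold pvKeep; rw [hEmpF, hmapb]; simp
        have hp3 := preG_head seen l rest hpre hk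
        unfold pvParses3 at hp3
        simp only [Bool.and_eq_true, Option.isSome_iff_exists] at hp3
        obtain ⟨⟨⟨d, hd⟩, ⟨s, hs⟩⟩, ⟨c, hc⟩⟩ := hp3
        have htail := preG_tail seen l rest hpre (by rw [hEmpF]; simp)
        rw [hmapb, Bool.or_false] at htail
        have hrec := ih (PySem.Set.add acc (s, d, c)) (read + 1) seen htail
        have hparse : pvParseLine l = some (s, d, c) := by
          simp only [pvParseLine, hd, hs, hc]
        have heF : (PySem.Str.len l == 0) = false := by
          revert hemp; cases (PySem.Str.len l == 0) <;> simp
        have hmF : (PySem.Str.isIn "map:" l) = false := by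
          revert hmap; cases (PySem.Str.isIn "map:" l) <;> simp
        simp only [goA, pvStop, hmF, heF, Bool.false_eq_true, if_false, Bool.and_false,
          hd, hs, hc, List.length_cons, map_succ_getD, List.take_succ_cons,
          List.filter_cons, hk, if_true, List.filterMap_cons, hparse,
          update_cons, hrec]
        rw [Prod.mk.injEq]
        exact ⟨rfl, by push_cast; ring⟩

-- ===== VERDICT (by name: the statement is the Claim_ definition above) =====
theorem read_mapping_spec : Claim_equal_read_mapping := by
  intro lines _ hpre
  unfold Spec_read_mapping read_mapping read_mapping_alt
  rw [goA_eq lines PySem.Set.empty 0 false hpre]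
  simp only [PySem.Set.ofList_eq_foldl, zero_add]
  rfl
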